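-- pv_equiv track=rewrite | github.com/Satrat/ReRe-GP | data_parse/make_loops.py | get_num_repeats
-- ===== SOURCE A (Python) =====
-- def get_num_repeats(list_words,min_meas=4,max_meas=16,density=8):
--     num_words = len(list_words)
--     endpoint_dict = {}
--     length_dict = {}
--     open_reps = []
--     curr_length = 0
--     curr_notes = {}
--     for i in range(num_words-2):
--         t = list_words[i]
--         if "note" in t:
--             instrument = t.split(":")[0]
--             if instrument not in curr_notes:
--                 curr_notes[instrument] = 1
--             else:
--                 curr_notes[instrument] += 1
--         if t == "new_measure":
--             curr_length += 1
--             if list_words[i+1] == "measure:repeat_open":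
--                 curr_length = 1
--                 curr_notes = {}
--                 open_reps.append(i)
--                 endpoint_dict[i] = -1
--             if "measure:repeat_close" in list_words[i+1] or "measure:repeat_close" in list_words[i+2]:
--                 total_notes = 0
--                 for inst in curr_notes.keys():
--                     total_notes += curr_notes[inst]
--                 if len(curr_notes) == 0:
--                     curr_density = 0.0
--                 else:
--                     curr_density = total_notes * 1.0 / len(curr_notes)
--                 if len(open_reps) > 0:
--                     idx = open_reps.pop(len(open_reps) - 1)
--                     endpoint_dict[idx] = i
--                     length_dict[idx] = (curr_length, curr_density)
--                 elif len(endpoint_dict) == 0: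
--                     endpoint_dict[0] = i
--                     length_dict[0] = (curr_length, curr_density)
--
--     num_repeats = 0
--     for start in endpoint_dict.keys():
--         end = endpoint_dict[start]
--         if end <= 0:
--             continue
--         length_meas = length_dict[start][0]
--         length_notes = length_dict[start][1]
--         if length_meas < min_meas or length_meas > max_meas or length_notes < density * length_meas:
--             continue
--
--         num_repeats += 1
--
--     return num_repeats
-- ===== SOURCE B (Python) =====
-- def get_num_repeats(list_words, min_meas=4, max_meas=16, density=8):
--     # Single fused pass: no endpoint/length dicts, no second pass, no index stack,
--     # no per-instrument counts -- just a stack depth, a "seen any endpoint" flag,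
--     # a running note total and the set of instruments since the last reset.
--     open_count = 0
--     seen_endpoint = False
--     num_repeats = 0
--     curr_length = 0
--     total_notes = 0
--     instruments = set()
--     for i in range(len(list_words) - 2):
--         t = list_words[i]
--         if "note" in t:
--             total_notes += 1
--             instruments.add(t.split(":")[0])
--         if t == "new_measure":
--             curr_length += 1
--             if list_words[i + 1] == "measure:repeat_open":
--                 curr_length = 1
--                 total_notes = 0
--                 instruments = set()
--                 open_count += 1
--                 seen_endpoint = True
--             if ("measure:repeat_close" in list_words[i + 1]
--                     or "measure:repeat_close" in list_words[i + 2]):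
--                 if open_count > 0:
--                     open_count -= 1
--                     closed = True
--                 elif not seen_endpoint:
--                     seen_endpoint = True
--                     closed = True
--                 else:
--                     closed = False
--                 if closed and i > 0 and min_meas <= curr_length <= max_meas:
--                     if instruments:
--                         curr_density = total_notes / len(instruments)
--                     else:
--                         curr_density = 0.0
--                     if curr_density >= density * curr_length:
--                         num_repeats += 1
--     return num_repeats
-- ===== Notes on version B (the rewrite author's own statement) =====
-- stated objective: simpler
-- what changed: Fused A's two passes into one: the endpoint dict, length dict, index stack and per-instrument count dict are replaced by a stack-depth counter, a seen-endpoint flag, a running note total and an instrument set, and each repeat is counted immediately when it closes.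
import Mathlib
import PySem

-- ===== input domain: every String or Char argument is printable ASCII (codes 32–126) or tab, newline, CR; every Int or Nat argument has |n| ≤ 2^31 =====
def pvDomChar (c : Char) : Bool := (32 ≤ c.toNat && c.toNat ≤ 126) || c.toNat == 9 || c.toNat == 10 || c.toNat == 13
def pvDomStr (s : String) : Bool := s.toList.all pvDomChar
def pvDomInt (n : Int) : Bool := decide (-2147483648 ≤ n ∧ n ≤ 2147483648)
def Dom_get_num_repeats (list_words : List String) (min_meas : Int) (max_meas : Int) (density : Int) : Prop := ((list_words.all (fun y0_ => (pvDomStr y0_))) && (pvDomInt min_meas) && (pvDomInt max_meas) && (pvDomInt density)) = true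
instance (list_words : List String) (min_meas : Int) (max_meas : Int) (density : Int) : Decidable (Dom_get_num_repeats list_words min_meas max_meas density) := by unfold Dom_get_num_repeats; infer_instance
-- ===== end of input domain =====

-- One honest line: B fuses A's two passes into one — a stack-depth counter, a seen-endpoint
-- flag, a running note total and an instrument set replace A's three dicts, index stack and
-- second pass over endpoints; same values everywhere (objective: simpler).

-- ===== PORT A =====
-- t.split(":")[0]  (split(":") is never empty, so index 0 always exists)
def pvInstr (t : String) : String := PySem.List.pyGetD ((PySem.Str.split? t ":").getD []) 0 ""

-- Python's float comparison `total/ninst < K` (with curr_density = 0.0 for ninst = 0), rendered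
-- as the exact rational comparison `total < K*ninst`; exact for the note counts reachable from
-- a list (double rounding of total/ninst cannot cross the integer threshold K there).
def pvDensLt (total ninst K : Int) : Bool :=
  if ninst = 0 then decide (0 < K) else decide (total < K * ninst)

-- total_notes: A's inner `for inst in curr_notes.keys(): total_notes += curr_notes[inst]` loop
def pvSumVals (d : PySem.Dict String Int) : Int :=
  d.keys.foldl (fun a k => a + d.getD k 0) 0

structure StA where
  ep : PySem.Dict Int Int                     -- endpoint_dict
  ld : PySem.Dict Int (Int × Int × Int)       -- length_dict: (curr_length, total_notes, ninst);
                                              -- the float density kept as the exact pair (total, ninst)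
  reps : List Int                             -- open_reps
  cl : Int                                    -- curr_length
  cn : PySem.Dict String Int                  -- curr_notes
deriving Repr, DecidableEq

-- the `if "note" in t` block
def stepAnote (t : String) (sa : StA) : StA :=
  if PySem.Str.isIn "note" t then
    let inst := pvInstr t
    if sa.cn.contains inst = false then { sa with cn := sa.cn.insert inst 1 }
    else { sa with cn := sa.cn.modify inst 0 (· + 1) }
  else sa

-- the `if list_words[i+1] == "measure:repeat_open"` block (opn = that test)
def stepAopen (i : Int) (opn : Bool) (sa : StA) : StA :=
  if opn then
    { sa with cl := 1, cn := PySem.Dict.empty, reps := sa.reps ++ [i], ep := sa.ep.insert i (-1) }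
  else sa

-- the `if "measure:repeat_close" in list_words[i+1] or ... in list_words[i+2]` block (cls = that test)
def stepAclose (i : Int) (cls : Bool) (sa : StA) : StA :=
  if cls then
    let total := pvSumVals sa.cn
    let ni : Int := sa.cn.size
    if h : sa.reps ≠ [] then
      -- idx = open_reps.pop(len(open_reps)-1): last element, rest = dropLast
      let idx := sa.reps.getLast h
      { sa with reps := sa.reps.dropLast,
                ep := sa.ep.insert idx i,
                ld := sa.ld.insert idx (sa.cl, total, ni) }
    else if sa.ep.size == 0 then
      { sa with ep := sa.ep.insert 0 i, ld := sa.ld.insert 0 (sa.cl, total, ni) }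
    else sa
  else sa

def stepA (lw : List String) (sa : StA) (i : Int) : StA :=
  let t := PySem.List.pyGetD lw i ""
  let sa := stepAnote t sa
  if t = "new_measure" then
    stepAclose i
      (PySem.Str.isIn "measure:repeat_close" (PySem.List.pyGetD lw (i + 1) "") ||
       PySem.Str.isIn "measure:repeat_close" (PySem.List.pyGetD lw (i + 2) ""))
      (stepAopen i (PySem.List.pyGetD lw (i + 1) "" == "measure:repeat_open")
        { sa with cl := sa.cl + 1 })
  else sa

def get_num_repeats (list_words : List String) (min_meas : Int) (max_meas : Int) (density : Int) : Int :=
  let num_words : Int := list_words.length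
  let s := (PySem.List.pyRange 0 (num_words - 2) 1).foldl (stepA list_words)
    ⟨PySem.Dict.empty, PySem.Dict.empty, [], 0, PySem.Dict.empty⟩
  s.ep.keys.foldl (fun acc start =>
    let e := s.ep.getD start 0
    if e ≤ 0 then acc
    else
      let v := s.ld.getD start (0, 0, 0)   -- length_dict[start]; the key is present whenever e > 0
      if v.1 < min_meas ∨ max_meas < v.1 ∨ pvDensLt v.2.1 v.2.2 (density * v.1) = true then acc
      else acc + 1) 0

-- ===== PORT B =====
structure StB where
  oc : Int            -- open_count
  seen : Bool         -- seen_endpoint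
  num : Int           -- num_repeats
  cl : Int            -- curr_length
  tn : Int            -- total_notes
  insts : PySem.Set String
deriving Repr, DecidableEq

def stepBnote (t : String) (sb : StB) : StB :=
  if PySem.Str.isIn "note" t then
    { sb with tn := sb.tn + 1, insts := PySem.Set.add sb.insts (pvInstr t) }
  else sb

def stepBopen (opn : Bool) (sb : StB) : StB :=
  if opn then
    { sb with cl := 1, tn := 0, insts := PySem.Set.empty, oc := sb.oc + 1, seen := true }
  else sb

def stepBclose (mn mx dn i : Int) (cls : Bool) (sb : StB) : StB :=
  if cls then
    let cs : Bool × StB :=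
      if 0 < sb.oc then (true, { sb with oc := sb.oc - 1 })
      else if sb.seen = false then (true, { sb with seen := true })
      else (false, sb)
    if cs.1 = true ∧ 0 < i ∧ mn ≤ cs.2.cl ∧ cs.2.cl ≤ mx ∧
       pvDensLt cs.2.tn (PySem.Set.len cs.2.insts) (dn * cs.2.cl) = false then
      { cs.2 with num := cs.2.num + 1 }
    else cs.2
  else sb

def stepB (lw : List String) (mn mx dn : Int) (sb : StB) (i : Int) : StB :=
  let t := PySem.List.pyGetD lw i ""
  let sb := stepBnote t sb
  if t = "new_measure" then
    stepBclose mn mx dn i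
      (PySem.Str.isIn "measure:repeat_close" (PySem.List.pyGetD lw (i + 1) "") ||
       PySem.Str.isIn "measure:repeat_close" (PySem.List.pyGetD lw (i + 2) ""))
      (stepBopen (PySem.List.pyGetD lw (i + 1) "" == "measure:repeat_open")
        { sb with cl := sb.cl + 1 })
  else sb

def get_num_repeats_alt (list_words : List String) (min_meas : Int) (max_meas : Int) (density : Int) : Int :=
  ((PySem.List.pyRange 0 ((list_words.length : Int) - 2) 1).foldl
    (stepB list_words min_meas max_meas density) ⟨0, false, 0, 0, 0, PySem.Set.empty⟩).num

-- ===== PRECONDITION & SPEC =====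
def Spec_get_num_repeats (list_words : List String) (min_meas : Int) (max_meas : Int) (density : Int) (out : Int) : Prop := out = get_num_repeats_alt list_words min_meas max_meas density
instance (list_words : List String) (min_meas : Int) (max_meas : Int) (density : Int) (out : Int) : Decidable (Spec_get_num_repeats list_words min_meas max_meas density out) := by unfold Spec_get_num_repeats; infer_instance

-- ===== CLAIM (what is proved, stated in full; the proofs are below) =====
def Claim_equal_get_num_repeats : Prop := ∀ (list_words : List String) (min_meas : Int) (max_meas : Int) (density : Int), Dom_get_num_repeats list_words min_meas max_meas density → Spec_get_num_repeats list_words min_meas max_meas density (get_num_repeats list_words min_meas max_meas density)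

-- ===== LEMMAS AND PROOFS =====

-- contribution of one endpoint-dict entry to A's second loop
def pvTerm (mn mx dn : Int) (ep : PySem.Dict Int Int) (ld : PySem.Dict Int (Int × Int × Int)) (k : Int) : Int :=
  let e := ep.getD k 0
  if e ≤ 0 then 0
  else
    let v := ld.getD k (0, 0, 0)
    if v.1 < mn ∨ mx < v.1 ∨ pvDensLt v.2.1 v.2.2 (dn * v.1) = true then 0 else 1

def pvCnt (mn mx dn : Int) (ep : PySem.Dict Int Int) (ld : PySem.Dict Int (Int × Int × Int)) : Int :=
  (ep.keys.map (pvTerm mn mx dn ep ld)).sum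

-- the invariant tying A's loop state to B's
def InvAB (mn mx dn : Int) (sa : StA) (sb : StB) : Prop :=
  sb.cl = sa.cl ∧
  sb.tn = pvSumVals sa.cn ∧
  sb.insts = sa.cn.keys ∧
  sb.oc = (sa.reps.length : Int) ∧
  sb.seen = decide (sa.ep.keys ≠ []) ∧
  (∀ k ∈ sa.reps, sa.ep.get? k = some (-1)) ∧
  sa.reps.Nodup ∧
  sa.ep.keys.Nodup ∧
  sa.cn.keys.Nodup ∧
  sb.num = pvCnt mn mx dn sa.ep sa.ld

theorem sum_map_update {α : Type} [DecidableEq α] (l : List α) (f g : α → Int) (x : α)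
    (hx : x ∈ l) (hnd : l.Nodup)
    (h : ∀ k ∈ l, k ≠ x → g k = f k) :
    (l.map g).sum = (l.map f).sum + (g x - f x) := by
  induction l with
  | nil => cases hx
  | cons a t ih =>
    rcases List.mem_cons.mp hx with rfl | hxt
    · have ht : ∀ k ∈ t, g k = f k := fun k hk =>
        h k (List.mem_cons_of_mem _ hk) (fun he => (List.nodup_cons.mp hnd).1 (he ▸ hk))
      simp [List.map_congr_left ht]; ring
    · have ha : g a = f a := h a (List.mem_cons_self ..) (fun he => (List.nodup_cons.mp hnd).1 (he ▸ hxt))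
      have := ih hxt (List.nodup_cons.mp hnd).2 (fun k hk => h k (List.mem_cons_of_mem _ hk))
      simp [ha, this]; ring

theorem pvSumVals_eq (d : PySem.Dict String Int) :
    pvSumVals d = (d.keys.map (fun k => d.getD k 0)).sum := by
  simp [pvSumVals, PySem.List.foldl_add]

theorem note_inv (mn mx dn : Int) (t : String) (sa : StA) (sb : StB)
    (h : InvAB mn mx dn sa sb) :
    InvAB mn mx dn (stepAnote t sa) (stepBnote t sb) ∧ (stepAnote t sa).ep = sa.ep := by
  obtain ⟨h1, h2, h3, h4, h5, h6, h7, h8, h9, h10⟩ := h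
  by_cases hn : PySem.Chars.isIn ['n', 'o', 't', 'e'] t.toList = true
  · have hB : stepBnote t sb
        = { sb with tn := sb.tn + 1, insts := PySem.Set.add sb.insts (pvInstr t) } := by
      simp [stepBnote, hn]
    by_cases hc : sa.cn.contains (pvInstr t) = false
    · have hni : pvInstr t ∉ sa.cn.keys := by
        rw [← PySem.Dict.contains_iff_mem_keys]; simp [hc]
      have hkeys := PySem.Dict.keys_insert_of_not_contains sa.cn (1 : Int) hc
      have hA : stepAnote t sa = { sa with cn := sa.cn.insert (pvInstr t) 1 } := by
        simp [stepAnote, hn, hc]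
      rw [hA, hB]
      refine ⟨⟨h1, ?_, ?_, h4, h5, h6, h7, h8, ?_, h10⟩, rfl⟩
      · show sb.tn + 1 = pvSumVals (sa.cn.insert (pvInstr t) 1)
        rw [pvSumVals_eq, hkeys, List.map_append]
        have hcon : ∀ k ∈ sa.cn.keys,
            (sa.cn.insert (pvInstr t) 1).getD k 0 = sa.cn.getD k 0 := by
          intro k hk
          rw [PySem.Dict.getD_insert]
          exact if_neg (fun he : k = pvInstr t => hni (he ▸ hk))
        rw [List.map_congr_left hcon]
        simp [PySem.Dict.getD_insert, h2, pvSumVals_eq]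
      · show PySem.Set.add sb.insts (pvInstr t) = (sa.cn.insert (pvInstr t) 1).keys
        rw [h3, hkeys]
        have hni' : pvInstr t ∉ (sa.cn.keys : PySem.Set String) := hni
        simp [PySem.Set.add, PySem.Set.contains, hni']
      · show (sa.cn.insert (pvInstr t) 1).keys.Nodup
        exact PySem.Dict.nodup_keys_insert _ _ _ h9
    · have hct : sa.cn.contains (pvInstr t) = true := by
        cases hcv : sa.cn.contains (pvInstr t) with
        | false => exact absurd hcv hc
        | true => rfl
      have hmem : pvInstr t ∈ sa.cn.keys := (PySem.Dict.contains_iff_mem_keys _ _).mp hct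
      have hkeys : (sa.cn.modify (pvInstr t) 0 (· + 1)).keys = sa.cn.keys := by
        rw [PySem.Dict.keys_modify]
        exact PySem.Dict.keys_insert_of_contains sa.cn _ hct
      have hA : stepAnote t sa = { sa with cn := sa.cn.modify (pvInstr t) 0 (· + 1) } := by
        simp [stepAnote, hn, hct]
      rw [hA, hB]
      refine ⟨⟨h1, ?_, ?_, h4, h5, h6, h7, h8, ?_, h10⟩, rfl⟩
      · show sb.tn + 1 = pvSumVals (sa.cn.modify (pvInstr t) 0 (· + 1))
        rw [pvSumVals_eq, hkeys]
        have := sum_map_update sa.cn.keys (fun k => sa.cn.getD k 0)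
          (fun k => (sa.cn.modify (pvInstr t) 0 (· + 1)).getD k 0) (pvInstr t) hmem h9
          (fun k _ hne => by simp only [PySem.Dict.getD_modify, if_neg hne])
        rw [this]
        simp only [PySem.Dict.getD_modify, ← pvSumVals_eq, h2]
        simp only [if_true]
        omega
      · show PySem.Set.add sb.insts (pvInstr t) = (sa.cn.modify (pvInstr t) 0 (· + 1)).keys
        rw [h3, hkeys]
        have hmem' : pvInstr t ∈ (sa.cn.keys : PySem.Set String) := hmem
        simp [PySem.Set.add, PySem.Set.contains, hmem']
      · show (sa.cn.modify (pvInstr t) 0 (· + 1)).keys.Nodup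
        rw [hkeys]; exact h9
  · have hA : stepAnote t sa = sa := by simp [stepAnote, hn]
    have hB : stepBnote t sb = sb := by simp [stepBnote, hn]
    rw [hA, hB]
    exact ⟨⟨h1, h2, h3, h4, h5, h6, h7, h8, h9, h10⟩, rfl⟩

theorem open_inv (mn mx dn i : Int) (opn : Bool) (sa : StA) (sb : StB)
    (hk : ∀ k ∈ sa.ep.keys, k < i) (h : InvAB mn mx dn sa sb) :
    InvAB mn mx dn (stepAopen i opn sa) (stepBopen opn sb) ∧
      (∀ k ∈ (stepAopen i opn sa).ep.keys, k ∈ sa.ep.keys ∨ k = i) := by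
  obtain ⟨h1, h2, h3, h4, h5, h6, h7, h8, h9, h10⟩ := h
  cases opn with
  | false =>
    simp only [stepAopen, stepBopen, Bool.false_eq_true, if_false]
    exact ⟨⟨h1, h2, h3, h4, h5, h6, h7, h8, h9, h10⟩, fun k hk' => Or.inl hk'⟩
  | true =>
    have hni : i ∉ sa.ep.keys := fun hmem => lt_irrefl i (hk i hmem)
    have hcont : sa.ep.contains i = false := by
      rw [PySem.Dict.contains_eq_decide_mem_keys]; simp [hni]
    have hkeys := PySem.Dict.keys_insert_of_not_contains sa.ep (-1 : Int) hcont
    have hsub : ∀ k ∈ sa.reps, k ∈ sa.ep.keys := by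
      intro k hk'
      rw [← PySem.Dict.contains_iff_mem_keys, PySem.Dict.contains_eq_isSome_get?, h6 k hk']
      rfl
    simp only [stepAopen, stepBopen, if_true]
    refine ⟨⟨rfl, ?_, ?_, ?_, ?_, ?_, ?_, ?_, ?_, ?_⟩, ?_⟩
    · show (0 : Int) = pvSumVals PySem.Dict.empty
      simp [pvSumVals_eq, PySem.Dict.keys_empty]
    · show PySem.Set.empty = (PySem.Dict.empty : PySem.Dict String Int).keys
      simp [PySem.Set.empty, PySem.Dict.keys_empty]
    · show sb.oc + 1 = ((sa.reps ++ [i]).length : Int)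
      rw [h4]; push_cast [List.length_append, List.length_singleton]; ring
    · show true = decide ((sa.ep.insert i (-1)).keys ≠ [])
      rw [hkeys]; simp
    · show ∀ k ∈ sa.reps ++ [i], (sa.ep.insert i (-1)).get? k = some (-1)
      intro k hk'
      rcases List.mem_append.mp hk' with hr | hi'
      · have hne : k ≠ i := ne_of_lt (hk k (hsub k hr))
        rw [PySem.Dict.get?_insert, if_neg hne]
        exact h6 k hr
      · have : k = i := by simpa using hi'
        subst this
        rw [PySem.Dict.get?_insert, if_pos rfl]
    · show (sa.reps ++ [i]).Nodup
      refine List.Nodup.append h7 (List.nodup_singleton _) ?_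
      intro a ha hb
      have : a = i := by simpa using hb
      subst this
      exact absurd (hk a (hsub a ha)) (lt_irrefl a)
    · exact PySem.Dict.nodup_keys_insert _ _ _ h8
    · show (PySem.Dict.empty : PySem.Dict String Int).keys.Nodup
      simp [PySem.Dict.keys_empty]
    · show sb.num = pvCnt mn mx dn (sa.ep.insert i (-1)) sa.ld
      unfold pvCnt
      rw [hkeys, List.map_append]
      have hterm : ∀ k ∈ sa.ep.keys,
          pvTerm mn mx dn (sa.ep.insert i (-1)) sa.ld k = pvTerm mn mx dn sa.ep sa.ld k := by
        intro k hk'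
        have hne : k ≠ i := ne_of_lt (hk k hk')
        simp only [pvTerm, PySem.Dict.getD_insert, if_neg hne]
      have hz : pvTerm mn mx dn (sa.ep.insert i (-1)) sa.ld i = 0 := by
        simp [pvTerm]
      rw [List.map_congr_left hterm]
      simp only [List.map_cons, List.map_nil, hz, List.sum_append, List.sum_cons, List.sum_nil]
      rw [h10]; unfold pvCnt; ring
    · show ∀ k ∈ (sa.ep.insert i (-1)).keys, k ∈ sa.ep.keys ∨ k = i
      intro k hk'
      rw [hkeys] at hk'
      rcases List.mem_append.mp hk' with hm | hm
      · exact Or.inl hm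
      · exact Or.inr (by simpa using hm)

theorem close_inv (mn mx dn i : Int) (cls : Bool) (sa : StA) (sb : StB)
    (hi : 0 ≤ i) (h : InvAB mn mx dn sa sb) :
    InvAB mn mx dn (stepAclose i cls sa) (stepBclose mn mx dn i cls sb) ∧
      (∀ k ∈ (stepAclose i cls sa).ep.keys, k ∈ sa.ep.keys ∨ k = 0) := by
  obtain ⟨h1, h2, h3, h4, h5, h6, h7, h8, h9, h10⟩ := h
  cases cls with
  | false =>
    simp only [stepAclose, stepBclose, Bool.false_eq_true, if_false]
    exact ⟨⟨h1, h2, h3, h4, h5, h6, h7, h8, h9, h10⟩, fun k hk' => Or.inl hk'⟩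
  | true =>
    have hlenS : PySem.Set.len sb.insts = (sa.cn.size : Int) := by
      rw [h3]; simp [PySem.Set.len, PySem.Dict.keys, PySem.Dict.size]
    by_cases ha : sa.reps ≠ []
    · -- pop branch
      have hlen : 0 < sa.reps.length := List.length_pos_of_ne_nil ha
      have hoc : 0 < sb.oc := by rw [h4]; exact_mod_cast hlen
      set idx := sa.reps.getLast ha with hidxdef
      have hidx_reps : idx ∈ sa.reps := List.getLast_mem ha
      have hg : sa.ep.get? idx = some (-1) := h6 idx hidx_reps
      have hidx_keys : idx ∈ sa.ep.keys := by
        rw [← PySem.Dict.contains_iff_mem_keys, PySem.Dict.contains_eq_isSome_get?, hg]; rfl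
      have hcont : sa.ep.contains idx = true := (PySem.Dict.contains_iff_mem_keys _ _).mpr hidx_keys
      have hkeys : (sa.ep.insert idx i).keys = sa.ep.keys :=
        PySem.Dict.keys_insert_of_contains sa.ep _ hcont
      have hsplit : sa.reps.dropLast ++ [idx] = sa.reps := List.dropLast_append_getLast ha
      have hnotin : idx ∉ sa.reps.dropLast := by
        have h7' := h7
        rw [← hsplit] at h7'
        have hd := (List.nodup_append.mp h7').2.2
        exact fun hmem => hd idx hmem idx (by simp) rfl
      have hA : stepAclose i true sa =
          { sa with reps := sa.reps.dropLast,
                    ep := sa.ep.insert idx i,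
                    ld := sa.ld.insert idx (sa.cl, pvSumVals sa.cn, (sa.cn.size : Int)) } := by
        simp only [stepAclose, if_true, dif_pos ha]
        rfl
      have hnew : pvTerm mn mx dn (sa.ep.insert idx i)
          (sa.ld.insert idx (sa.cl, pvSumVals sa.cn, (sa.cn.size : Int))) idx
          = if 0 < i ∧ mn ≤ sa.cl ∧ sa.cl ≤ mx ∧
              pvDensLt (pvSumVals sa.cn) (sa.cn.size : Int) (dn * sa.cl) = false then 1 else 0 := by
        simp only [pvTerm, PySem.Dict.getD_insert]
        split_ifs <;> simp_all <;> omega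
      have hupd := sum_map_update sa.ep.keys (pvTerm mn mx dn sa.ep sa.ld)
        (pvTerm mn mx dn (sa.ep.insert idx i)
          (sa.ld.insert idx (sa.cl, pvSumVals sa.cn, (sa.cn.size : Int)))) idx hidx_keys h8
        (fun k _ hne => by
          simp only [pvTerm, PySem.Dict.getD_insert, if_neg hne])
      have hold : pvTerm mn mx dn sa.ep sa.ld idx = 0 := by
        simp [pvTerm, PySem.Dict.getD_eq_get?_getD, hg]
      have hcnt : pvCnt mn mx dn (sa.ep.insert idx i)
          (sa.ld.insert idx (sa.cl, pvSumVals sa.cn, (sa.cn.size : Int)))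
          = pvCnt mn mx dn sa.ep sa.ld +
            (if 0 < i ∧ mn ≤ sa.cl ∧ sa.cl ≤ mx ∧
              pvDensLt (pvSumVals sa.cn) (sa.cn.size : Int) (dn * sa.cl) = false then 1 else 0) := by
        unfold pvCnt
        rw [hkeys, hupd, hold, hnew]
        ring
      rw [hA]
      simp only [stepBclose, if_true, if_pos hoc]
      refine ⟨?_, fun k hk' => Or.inl (by rwa [hkeys] at hk')⟩
      split_ifs with hP
      · obtain ⟨-, hPi, hPmn, hPmx, hPd⟩ := hP
        rw [h1] at hPmn hPmx
        rw [h2, hlenS, h1] at hPd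
        refine ⟨h1, h2, h3, ?_, ?_, ?_, ?_, ?_, h9, ?_⟩
        · show sb.oc - 1 = ((sa.reps.dropLast).length : Int)
          rw [List.length_dropLast]
          omega
        · show sb.seen = decide ((sa.ep.insert idx i).keys ≠ [])
          rw [hkeys]; exact h5
        · show ∀ k ∈ sa.reps.dropLast, (sa.ep.insert idx i).get? k = some (-1)
          intro k hk'
          have hne : k ≠ idx := fun (he : k = idx) => hnotin (he ▸ hk')
          rw [PySem.Dict.get?_insert, if_neg hne]
          exact h6 k (by rw [← hsplit]; exact List.mem_append_left _ hk')
        · show (sa.reps.dropLast).Nodup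
          exact List.Nodup.sublist (List.dropLast_sublist sa.reps) h7
        · show (sa.ep.insert idx i).keys.Nodup
          rw [hkeys]; exact h8
        · show sb.num + 1 = _
          rw [hcnt, if_pos ⟨hPi, hPmn, hPmx, hPd⟩, h10]

      · refine ⟨h1, h2, h3, ?_, ?_, ?_, ?_, ?_, h9, ?_⟩
        · show sb.oc - 1 = ((sa.reps.dropLast).length : Int)
          rw [List.length_dropLast]
          omega
        · show sb.seen = decide ((sa.ep.insert idx i).keys ≠ [])
          rw [hkeys]; exact h5
        · show ∀ k ∈ sa.reps.dropLast, (sa.ep.insert idx i).get? k = some (-1)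
          intro k hk'
          have hne : k ≠ idx := fun (he : k = idx) => hnotin (he ▸ hk')
          rw [PySem.Dict.get?_insert, if_neg hne]
          exact h6 k (by rw [← hsplit]; exact List.mem_append_left _ hk')
        · show (sa.reps.dropLast).Nodup
          exact List.Nodup.sublist (List.dropLast_sublist sa.reps) h7
        · show (sa.ep.insert idx i).keys.Nodup
          rw [hkeys]; exact h8
        · show sb.num = _
          rw [hcnt, if_neg, add_zero]
          · exact h10
          · intro hc
            exact hP ⟨trivial, hc.1, h1 ▸ hc.2.1, h1 ▸ hc.2.2.1, by rw [h2, hlenS, h1]; exact hc.2.2.2⟩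
    · -- open_reps empty
      rw [not_ne_iff] at ha
      have hoc0 : sb.oc = 0 := by rw [h4, ha]; rfl
      by_cases hz : sa.ep.size = 0
      · -- endpoint_dict empty: fallback entry at key 0
        have hitems : sa.ep.keys = [] := by
          have : sa.ep.keys.length = 0 := by
            simpa [PySem.Dict.keys, PySem.Dict.size] using hz
          exact List.eq_nil_of_length_eq_zero this
        have hseen : sb.seen = false := by rw [h5, hitems]; simp
        have hcont0 : sa.ep.contains 0 = false := by
          rw [PySem.Dict.contains_eq_decide_mem_keys, hitems]; simp
        have hkeys0 : (sa.ep.insert 0 i).keys = [(0 : Int)] := by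
          rw [PySem.Dict.keys_insert_of_not_contains _ _ hcont0, hitems]; rfl
        have hnum0 : sb.num = 0 := by rw [h10]; simp [pvCnt, hitems]
        have hA : stepAclose i true sa =
            { sa with ep := sa.ep.insert 0 i,
                      ld := sa.ld.insert 0 (sa.cl, pvSumVals sa.cn, (sa.cn.size : Int)) } := by
          simp only [stepAclose, if_true]
          rw [dif_neg (show ¬ (sa.reps ≠ []) from fun hcon => hcon ha)]
          simp [hz]
        have hocn : ¬ 0 < sb.oc := by rw [hoc0]; omega
        have hnew : pvTerm mn mx dn (sa.ep.insert 0 i)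
            (sa.ld.insert 0 (sa.cl, pvSumVals sa.cn, (sa.cn.size : Int))) 0
            = if 0 < i ∧ mn ≤ sa.cl ∧ sa.cl ≤ mx ∧
                pvDensLt (pvSumVals sa.cn) (sa.cn.size : Int) (dn * sa.cl) = false then 1 else 0 := by
          simp only [pvTerm, PySem.Dict.getD_insert]
          split_ifs <;> simp_all <;> omega
        have hcnt : pvCnt mn mx dn (sa.ep.insert 0 i)
            (sa.ld.insert 0 (sa.cl, pvSumVals sa.cn, (sa.cn.size : Int)))
            = if 0 < i ∧ mn ≤ sa.cl ∧ sa.cl ≤ mx ∧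
                pvDensLt (pvSumVals sa.cn) (sa.cn.size : Int) (dn * sa.cl) = false then 1 else 0 := by
          unfold pvCnt
          rw [hkeys0]
          simp only [List.map_cons, List.map_nil, List.sum_cons, List.sum_nil, hnew]
          ring
        rw [hA]
        simp only [stepBclose, if_true, if_neg hocn]
        rw [if_pos hseen]
        refine ⟨?_, fun k hk' => Or.inr (by rw [hkeys0] at hk'; simpa using hk')⟩
        split_ifs with hP
        · obtain ⟨-, hPi, hPmn, hPmx, hPd⟩ := hP
          rw [h1] at hPmn hPmx
          rw [h2, hlenS, h1] at hPd
          refine ⟨h1, h2, h3, h4, ?_, ?_, h7, ?_, h9, ?_⟩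
          · show true = decide ((sa.ep.insert 0 i).keys ≠ [])
            rw [hkeys0]; simp
          · show ∀ k ∈ sa.reps, (sa.ep.insert 0 i).get? k = some (-1)
            rw [ha]; intro k hk'; cases hk'
          · show (sa.ep.insert 0 i).keys.Nodup
            rw [hkeys0]; simp
          · show sb.num + 1 = _
            rw [hcnt, if_pos ⟨hPi, hPmn, hPmx, hPd⟩, hnum0]
            norm_num
        · refine ⟨h1, h2, h3, h4, ?_, ?_, h7, ?_, h9, ?_⟩
          · show true = decide ((sa.ep.insert 0 i).keys ≠ [])
            rw [hkeys0]; simp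
          · show ∀ k ∈ sa.reps, (sa.ep.insert 0 i).get? k = some (-1)
            rw [ha]; intro k hk'; cases hk'
          · show (sa.ep.insert 0 i).keys.Nodup
            rw [hkeys0]; simp
          · show sb.num = _
            rw [hcnt, if_neg, hnum0]
            intro hc
            exact hP ⟨rfl, hc.1, h1 ▸ hc.2.1, h1 ▸ hc.2.2.1, by rw [h2, hlenS, h1]; exact hc.2.2.2⟩
      · -- endpoint_dict nonempty and no open repeat: nothing happens on either side
        have hne : sa.ep.keys ≠ [] := by
          intro hn
          apply hz
          have hlen0 : sa.ep.keys.length = 0 := by rw [hn]; rfl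
          simpa [PySem.Dict.keys, PySem.Dict.size] using hlen0
        have hseen : sb.seen = true := by rw [h5]; simp [hne]
        have hA : stepAclose i true sa = sa := by
          simp only [stepAclose, if_true]
          rw [dif_neg (show ¬ (sa.reps ≠ []) from fun hcon => hcon ha)]
          simp [hz]
        have hB : stepBclose mn mx dn i true sb = sb := by
          simp only [stepBclose, if_true, if_neg (by rw [hoc0]; omega : ¬ 0 < sb.oc), hseen]
          simp
        rw [hA, hB]
        exact ⟨⟨h1, h2, h3, h4, h5, h6, h7, h8, h9, h10⟩, fun k hk' => Or.inl hk'⟩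

theorem step_inv (lw : List String) (mn mx dn i : Int) (sa : StA) (sb : StB)
    (hi : 0 ≤ i) (hk : ∀ k ∈ sa.ep.keys, k < i) (h : InvAB mn mx dn sa sb) :
    InvAB mn mx dn (stepA lw sa i) (stepB lw mn mx dn sb i) ∧
      (∀ k ∈ (stepA lw sa i).ep.keys, k ∈ sa.ep.keys ∨ (0 ≤ k ∧ k ≤ i)) := by
  obtain ⟨hInv1, hep1⟩ := note_inv mn mx dn (PySem.List.pyGetD lw i "") sa sb h
  simp only [stepA, stepB]
  by_cases ht : PySem.List.pyGetD lw i "" = "new_measure"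
  · rw [if_pos ht, if_pos ht]
    have hInv2 : InvAB mn mx dn
        { stepAnote (PySem.List.pyGetD lw i "") sa with cl := (stepAnote (PySem.List.pyGetD lw i "") sa).cl + 1 }
        { stepBnote (PySem.List.pyGetD lw i "") sb with cl := (stepBnote (PySem.List.pyGetD lw i "") sb).cl + 1 } := by
      obtain ⟨g1, g2, g3, g4, g5, g6, g7, g8, g9, g10⟩ := hInv1
      exact ⟨by show _ + 1 = _ + 1; rw [g1], g2, g3, g4, g5, g6, g7, g8, g9, g10⟩
    have hk1 : ∀ k ∈ ({ stepAnote (PySem.List.pyGetD lw i "") sa with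
        cl := (stepAnote (PySem.List.pyGetD lw i "") sa).cl + 1 }).ep.keys, k < i := by
      intro k hk'
      apply hk
      have : ({ stepAnote (PySem.List.pyGetD lw i "") sa with
          cl := (stepAnote (PySem.List.pyGetD lw i "") sa).cl + 1 }).ep = sa.ep := hep1
      rwa [this] at hk'
    obtain ⟨hInv3, hk3⟩ := open_inv mn mx dn i
      (PySem.List.pyGetD lw (i + 1) "" == "measure:repeat_open") _ _ hk1 hInv2
    obtain ⟨hInv4, hk4⟩ := close_inv mn mx dn i
      (PySem.Str.isIn "measure:repeat_close" (PySem.List.pyGetD lw (i + 1) "") ||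
       PySem.Str.isIn "measure:repeat_close" (PySem.List.pyGetD lw (i + 2) "")) _ _ hi hInv3
    refine ⟨hInv4, ?_⟩
    intro k hk'
    rcases hk4 k hk' with hm | h0
    · rcases hk3 k hm with hm2 | hi'
      · left
        have he2 : ({ stepAnote (PySem.List.pyGetD lw i "") sa with
          cl := (stepAnote (PySem.List.pyGetD lw i "") sa).cl + 1 }).ep = sa.ep := hep1
        rwa [he2] at hm2
      · right; omega
    · right; omega
  · rw [if_neg ht, if_neg ht]
    exact ⟨hInv1, fun k hk' => Or.inl (by rwa [hep1] at hk')⟩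

theorem fold_inv (lw : List String) (mn mx dn : Int) (idxs : List Int) :
    ∀ (sa : StA) (sb : StB), idxs.Pairwise (· < ·) → (∀ j ∈ idxs, 0 ≤ j) →
    (∀ k ∈ sa.ep.keys, ∀ j ∈ idxs, k < j) → InvAB mn mx dn sa sb →
    InvAB mn mx dn (idxs.foldl (stepA lw) sa) (idxs.foldl (stepB lw mn mx dn) sb) := by
  induction idxs with
  | nil => intro sa sb _ _ _ h; exact h
  | cons i rest ih =>
    intro sa sb hp hnn hk h
    have hi : 0 ≤ i := hnn i (List.mem_cons_self ..)
    obtain ⟨h1, h2⟩ := step_inv lw mn mx dn i sa sb hi (fun k hk' => hk k hk' i (List.mem_cons_self ..)) h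
    refine ih _ _ (List.pairwise_cons.mp hp).2 (fun j hj => hnn j (List.mem_cons_of_mem _ hj)) ?_ h1
    intro k hk' j hj
    rcases h2 k hk' with hmem | ⟨_, hle⟩
    · exact hk k hmem j (List.mem_cons_of_mem _ hj)
    · exact lt_of_le_of_lt hle ((List.pairwise_cons.mp hp).1 j hj)

theorem secondLoop_eq (mn mx dn : Int) (ep : PySem.Dict Int Int) (ld : PySem.Dict Int (Int × Int × Int)) :
    (ep.keys.foldl (fun acc start =>
      let e := ep.getD start 0
      if e ≤ 0 then acc
      else
        let v := ld.getD start (0, 0, 0)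
        if v.1 < mn ∨ mx < v.1 ∨ pvDensLt v.2.1 v.2.2 (dn * v.1) = true then acc
        else acc + 1) 0) = pvCnt mn mx dn ep ld := by
  have : ∀ (l : List Int) (a : Int),
      (l.foldl (fun acc start =>
        let e := ep.getD start 0
        if e ≤ 0 then acc
        else
          let v := ld.getD start (0, 0, 0)
          if v.1 < mn ∨ mx < v.1 ∨ pvDensLt v.2.1 v.2.2 (dn * v.1) = true then acc
          else acc + 1) a) = a + (l.map (pvTerm mn mx dn ep ld)).sum := by
    intro l
    induction l with
    | nil => simp
    | cons x t ih =>
      intro a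
      simp only [List.foldl_cons, List.map_cons, List.sum_cons, ih, pvTerm]
      split_ifs <;> ring
  simpa using this ep.keys 0

theorem get_num_repeats_spec : Claim_equal_get_num_repeats := by
  intro lw mn mx dn _
  unfold Spec_get_num_repeats get_num_repeats get_num_repeats_alt
  have h0 : InvAB mn mx dn ⟨PySem.Dict.empty, PySem.Dict.empty, [], 0, PySem.Dict.empty⟩
      ⟨0, false, 0, 0, 0, PySem.Set.empty⟩ := by
    refine ⟨rfl, by simp [pvSumVals, PySem.Dict.keys_empty], by simp [PySem.Set.empty, PySem.Dict.keys_empty], rfl,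
      by simp [PySem.Dict.keys_empty], by simp, by simp, by simp [PySem.Dict.keys_empty], by simp [PySem.Dict.keys_empty],
      by simp [pvCnt, PySem.Dict.keys_empty]⟩
  have hfold := fold_inv lw mn mx dn (PySem.List.pyRange 0 ((lw.length : Int) - 2) 1)
    _ _ (PySem.List.pairwise_lt_pyRange_one 0 _)
    (fun j hj => (PySem.List.mem_pyRange_one.mp hj).1)
    (by simp [PySem.Dict.keys_empty]) h0
  obtain ⟨-, -, -, -, -, -, -, -, -, hnum⟩ := hfold
  rw [secondLoop_eq]
  exact hnum.symm
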